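-- pv_equiv track=rewrite | github.com/36yi/Algorithm | Topcoder/Party.py | BestInvitation
-- ===== SOURCE A (Python) =====
-- def BestInvitation(first,second):
--     # 1번
--     # m = 0
--     # for i in range(len(first)):
--     #     topic = first[i]
--     #     s = first.count(topic)
--     #     s += second.count(topic)
--     #     if(s > m):
--     #         m = s
--     # for i in range(len(first)):
--     #     topic = second[i]
--     #     s = first.count(topic)
--     #     s += second.count(topic)
--     #     if(s > m):
--     #         m = s
--     #
--     # return m
--
--     #2 연관배열이 딕셔너리 였으
--     dic = {}
--     for i in range(len(first)):
--         dic[first[i]] = 0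
--         dic[second[i]] = 0
--
--     for i in range(len(first)):
--         dic[first[i]] += 1
--         dic[second[i]] += 1
--     return max(dic.values())
-- ===== SOURCE B (Python) =====
-- def BestInvitation(first, second):
--     items = []
--     for i in range(len(first)):
--         items.append(first[i])
--         items.append(second[i])
--     best = 0
--     while items:
--         x = items[0]
--         c = items.count(x)
--         if c > best:
--             best = c
--         items = [y for y in items if y != x]
--     return best
-- ===== Notes on version B (the rewrite author's own statement) =====
-- stated objective: alternative
-- what changed: B replaces A's dictionary (key-initialisation pass, increment pass, max of the values) with a dict-free count-and-eliminate loop: while items remain, count the first element in the combined list, keep the running maximum, and filter that value out.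
-- crash fix: On first == [] A raises ValueError (max() of an empty dict); B's loop simply never runs and returns 0. — e.g. on BestInvitation([], []): A raises ValueError, B returns 0
import Mathlib
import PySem

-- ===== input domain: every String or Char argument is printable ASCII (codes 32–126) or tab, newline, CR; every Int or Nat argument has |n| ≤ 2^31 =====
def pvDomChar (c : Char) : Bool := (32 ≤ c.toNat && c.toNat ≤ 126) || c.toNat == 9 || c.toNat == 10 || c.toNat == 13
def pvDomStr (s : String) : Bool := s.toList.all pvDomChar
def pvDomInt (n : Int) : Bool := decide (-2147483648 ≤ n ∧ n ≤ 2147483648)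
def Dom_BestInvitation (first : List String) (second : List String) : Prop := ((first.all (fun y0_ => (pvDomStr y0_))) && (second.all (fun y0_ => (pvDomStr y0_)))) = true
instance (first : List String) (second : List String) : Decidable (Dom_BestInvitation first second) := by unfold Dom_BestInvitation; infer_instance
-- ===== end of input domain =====

-- B replaces A's dictionary counting (init pass + increment pass + max of values) with a
-- dict-free count-and-eliminate loop over the combined list; same value on all of Pre_.

-- ===== PORT A =====
-- pyGetD: indexing first[i]/second[i]; out-of-range second[i] (IndexError) is excluded by Pre_,
-- so the default "" is never read on admitted inputs.  dic[x] += 1 is modify with default 0;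
-- whenever the Python reaches this loop every key is already present, so the default is never read.
def BestInvitation (first : List String) (second : List String) : Int :=
  let dic : PySem.Dict String Int :=
    (PySem.List.pyRange 0 (PySem.List.len first)).foldl
      (fun d i => (d.insert (PySem.List.pyGetD first i "") 0).insert (PySem.List.pyGetD second i "") 0)
      PySem.Dict.empty
  let dic :=
    (PySem.List.pyRange 0 (PySem.List.len first)).foldl
      (fun d i => (d.modify (PySem.List.pyGetD first i "") 0 (· + 1)).modify (PySem.List.pyGetD second i "") 0 (· + 1))
      dic
  (PySem.List.max? dic.values (fun v => v)).getD 0   -- max(dic.values()); empty dict (ValueError) excluded by Pre_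

-- ===== PORT B =====
-- the 'while items:' loop of Source B
def altLoop (best : Int) (items : List String) : Int :=
  match items with
  | [] => best
  | x :: t =>
    let c : Int := (PySem.List.count (x :: t) x : Int)
    altLoop (if c > best then c else best) ((x :: t).filter (fun y => y != x))
termination_by items.length
decreasing_by
  simp only [List.filter_cons]
  have hx : (x != x) = false := by simp
  simp only [hx]
  exact Nat.lt_succ_of_le (List.length_filter_le _ _)

def BestInvitation_alt (first : List String) (second : List String) : Int :=
  let items : List String :=
    (PySem.List.pyRange 0 (PySem.List.len first)).foldl
      (fun acc i => (acc ++ [PySem.List.pyGetD first i ""]) ++ [PySem.List.pyGetD second i ""]) []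
  altLoop 0 items

-- ===== PRECONDITION & SPEC =====
-- Pre_ excludes exactly the crashes of A: second shorter than first (IndexError on second[i])
-- and first empty (ValueError from max() on the empty dict).
def Pre_BestInvitation (first : List String) (second : List String) : Prop :=
  first ≠ [] ∧ first.length ≤ second.length
instance (first : List String) (second : List String) : Decidable (Pre_BestInvitation first second) := by unfold Pre_BestInvitation; infer_instance

def pvWitness_BestInvitation : List String × List String := (["a", "b"], ["b", "b"])

-- On first == [] A raises ValueError (max() of an empty sequence); B returns 0 (theorem BestInvitation_raises below).
def Raises_BestInvitation (first : List String) (second : List String) : Prop := first = []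
instance (first : List String) (second : List String) : Decidable (Raises_BestInvitation first second) := by unfold Raises_BestInvitation; infer_instance
def pvRaiseWitness_BestInvitation : List String × List String := ([], [])
def pvRaiseWitnessOut_BestInvitation : Int := 0

def Spec_BestInvitation (first : List String) (second : List String) (out : Int) : Prop := out = BestInvitation_alt first second
instance (first : List String) (second : List String) (out : Int) : Decidable (Spec_BestInvitation first second out) := by unfold Spec_BestInvitation; infer_instance

-- ===== CLAIM (what is proved, stated in full; the proofs are below) =====
def Claim_equal_BestInvitation : Prop := ∀ (first : List String) (second : List String), Dom_BestInvitation first second → Pre_BestInvitation first second → Spec_BestInvitation first second (BestInvitation first second)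
def Claim_raises_BestInvitation : Prop := (∀ (first : List String) (second : List String), Dom_BestInvitation first second → Raises_BestInvitation first second → ¬ Pre_BestInvitation first second) ∧ (Dom_BestInvitation (pvRaiseWitness_BestInvitation.1) (pvRaiseWitness_BestInvitation.2) ∧ Raises_BestInvitation (pvRaiseWitness_BestInvitation.1) (pvRaiseWitness_BestInvitation.2) ∧ BestInvitation_alt (pvRaiseWitness_BestInvitation.1) (pvRaiseWitness_BestInvitation.2) = pvRaiseWitnessOut_BestInvitation)

-- ===== LEMMAS AND PROOFS =====

-- the combined list [first[0], second[0], first[1], second[1], …]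
def pvItems (first second : List String) : List String :=
  (first.zip second).flatMap (fun p => [p.1, p.2])

lemma zip_take_right : ∀ (fs ss : List String), fs.zip (ss.take fs.length) = fs.zip ss := by
  intro fs
  induction fs with
  | nil => intro ss; simp
  | cons x t ih =>
    intro ss
    cases ss with
    | nil => simp
    | cons y u => simp [List.zip_cons_cons, ih]

lemma foldl_pair {β : Type} (g : β → String → β) (fs ss : List String) :
    ∀ (m : Nat), m ≤ fs.length → m ≤ ss.length → ∀ (init : β),
    (PySem.List.pyRange 0 (m : Int)).foldl
        (fun a i => g (g a (PySem.List.pyGetD fs i "")) (PySem.List.pyGetD ss i "")) init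
      = ((fs.take m).zip (ss.take m)).foldl (fun a p => g (g a p.1) p.2) init := by
  intro m
  induction m with
  | zero => intro _ _ init; simp [PySem.List.pyRange_one_eq_nil]
  | succ m ih =>
    intro h1 h2 init
    have hm1 : m < fs.length := by omega
    have hm2 : m < ss.length := by omega
    have hc : ((m + 1 : Nat) : Int) = (m : Int) + 1 := by push_cast; ring
    rw [hc, PySem.List.pyRange_one_succ_right (by positivity), List.foldl_append,
        ih (by omega) (by omega) init]
    have ht1 : fs.take (m + 1) = fs.take m ++ [fs[m]] := by
      rw [List.take_add_one]; simp [List.getElem?_eq_getElem hm1]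
    have ht2 : ss.take (m + 1) = ss.take m ++ [ss[m]] := by
      rw [List.take_add_one]; simp [List.getElem?_eq_getElem hm2]
    rw [ht1, ht2, List.zip_append (by simp [List.length_take]; omega), List.foldl_append]
    simp [PySem.List.pyGetD_natCast, List.getD_eq_getElem?_getD, List.getElem?_eq_getElem hm1,
          List.getElem?_eq_getElem hm2]

lemma foldl_flat {β : Type} (g : β → String → β) :
    ∀ (pairs : List (String × String)) (init : β),
    pairs.foldl (fun a p => g (g a p.1) p.2) init
      = (pairs.flatMap (fun p => [p.1, p.2])).foldl g init := by
  intro pairs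
  induction pairs with
  | nil => intro init; simp
  | cons p t ih => intro init; simp [List.flatMap_cons, ih]

lemma fold_items {β : Type} (g : β → String → β) (fs ss : List String)
    (h : fs.length ≤ ss.length) (init : β) :
    (PySem.List.pyRange 0 (PySem.List.len fs)).foldl
        (fun a i => g (g a (PySem.List.pyGetD fs i "")) (PySem.List.pyGetD ss i "")) init
      = (pvItems fs ss).foldl g init := by
  rw [PySem.List.len_eq, foldl_pair g fs ss fs.length le_rfl h init]
  rw [List.take_length, zip_take_right, pvItems, foldl_flat]

lemma insert0_getD : ∀ (l : List String) (d : PySem.Dict String Int),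
    (∀ k, d.getD k 0 = 0) → ∀ k, (l.foldl (fun d x => d.insert x 0) d).getD k 0 = 0 := by
  intro l
  induction l with
  | nil => intro d hd k; exact hd k
  | cons x t ih =>
    intro d hd k
    rw [List.foldl_cons]
    refine ih _ ?_ k
    intro k'
    rw [PySem.Dict.getD_insert]
    split <;> simp [hd]

lemma ofList_filter (p : String → Bool) :
    ∀ (l : List String), PySem.Set.ofList (l.filter p) = (PySem.Set.ofList l).filter p := by
  intro l
  induction l with
  | nil => simp [PySem.Set.ofList_nil]
  | cons y t ih =>
    by_cases hp : p y
    · rw [List.filter_cons_of_pos hp, PySem.Set.ofList_cons, PySem.Set.ofList_cons, ih]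
      rw [List.filter_cons_of_pos hp]
      simp only [PySem.Set.discard, List.filter_filter]
      congr 1
      exact List.filter_congr (fun a _ => by rw [Bool.and_comm])
    · rw [List.filter_cons_of_neg hp, PySem.Set.ofList_cons, ih]
      rw [List.filter_cons_of_neg hp]
      simp only [PySem.Set.discard, List.filter_filter]
      refine List.filter_congr (fun a _ => ?_)
      by_cases ha : a = y
      · subst ha; simp [hp]
      · simp [ha]

lemma altLoop_eq : ∀ (n : Nat) (items : List String), items.length ≤ n → ∀ (b : Int),
    altLoop b items
      = ((PySem.Set.ofList items).map (fun k => (List.count k items : Int))).foldl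
          (fun acc c => if c > acc then c else acc) b := by
  intro n
  induction n with
  | zero =>
    intro items h b
    have : items = [] := List.eq_nil_of_length_eq_zero (Nat.le_zero.mp h)
    subst this; simp [altLoop, PySem.Set.ofList_nil]
  | succ n ih =>
    intro items h b
    cases items with
    | nil => simp [altLoop, PySem.Set.ofList_nil]
    | cons x t =>
      rw [altLoop]
      have hfil : (x :: t).filter (fun y => y != x) = t.filter (fun y => y != x) := by
        simp
      have hlen : (t.filter (fun y => y != x)).length ≤ n := by
        have := List.length_filter_le (fun y => y != x) t
        simp at h; omega
      have hof : PySem.Set.ofList (t.filter (fun y => y != x))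
          = (PySem.Set.ofList t).discard x := by
        rw [ofList_filter]; rfl
      have hmap : (PySem.Set.ofList (t.filter (fun y => y != x))).map
            (fun k => (List.count k (t.filter (fun y => y != x)) : Int))
          = ((PySem.Set.ofList t).discard x).map (fun k => (List.count k (x :: t) : Int)) := by
        rw [hof]
        refine List.map_congr_left (fun k hk => ?_)
        have hkx : k ≠ x := by
          have := List.of_mem_filter hk
          simpa using this
        have h1 : List.count k (t.filter (fun y => y != x)) = List.count k t :=
          List.count_filter (by simpa using hkx)
        have h2 : List.count k (x :: t) = List.count k t := by
          rw [List.count_cons]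
          simp [Ne.symm hkx]
        rw [h1, h2]
      rw [hfil, ih _ hlen, hmap, PySem.Set.ofList_cons, List.map_cons, List.foldl_cons]
      have hc : (PySem.List.count (x :: t) x : Int) = (List.count x (x :: t) : Int) := by
        simp [PySem.List.count_eq]
      rw [hc]

lemma foldl_append_id : ∀ (l acc : List String), l.foldl (fun a x => a ++ [x]) acc = acc ++ l := by
  intro l
  induction l with
  | nil => intro acc; simp
  | cons x t ih => intro acc; simp [ih]

lemma foldA1 (fs ss : List String) (h : fs.length ≤ ss.length) :
    (PySem.List.pyRange 0 (PySem.List.len fs)).foldl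
        (fun d i => (d.insert (PySem.List.pyGetD fs i "") 0).insert (PySem.List.pyGetD ss i "") 0)
        (PySem.Dict.empty : PySem.Dict String Int)
      = (pvItems fs ss).foldl (fun d x => d.insert x 0) PySem.Dict.empty :=
  fold_items (fun (d : PySem.Dict String Int) x => d.insert x 0) fs ss h _

lemma foldA2 (fs ss : List String) (h : fs.length ≤ ss.length) (d0 : PySem.Dict String Int) :
    (PySem.List.pyRange 0 (PySem.List.len fs)).foldl
        (fun d i => (d.modify (PySem.List.pyGetD fs i "") 0 (· + 1)).modify (PySem.List.pyGetD ss i "") 0 (· + 1))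
        d0
      = (pvItems fs ss).foldl (fun d x => d.modify x 0 (· + 1)) d0 :=
  fold_items (fun (d : PySem.Dict String Int) x => d.modify x 0 (· + 1)) fs ss h _

lemma foldB (fs ss : List String) (h : fs.length ≤ ss.length) :
    (PySem.List.pyRange 0 (PySem.List.len fs)).foldl
        (fun acc i => (acc ++ [PySem.List.pyGetD fs i ""]) ++ [PySem.List.pyGetD ss i ""]) []
      = pvItems fs ss :=
  (fold_items (fun (a : List String) x => a ++ [x]) fs ss h []).trans (by rw [foldl_append_id]; rfl)

lemma update_ofList_self (items : List String) :
    (PySem.Set.ofList items).update items = PySem.Set.ofList items := by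
  rw [PySem.Set.update_eq_append_filter]
  have hnil : (PySem.Set.ofList items).filter
      (fun y => !(PySem.Set.contains (PySem.Set.ofList items) y)) = [] := by
    rw [List.filter_eq_nil_iff]
    intro a ha
    simpa using ha
  rw [hnil, List.append_nil]

lemma values_A (items : List String) :
    (items.foldl (fun d x => d.modify x 0 (· + 1))
        (items.foldl (fun d x => d.insert x 0) (PySem.Dict.empty : PySem.Dict String Int))).values
      = (PySem.Set.ofList items).map (fun k => (List.count k items : Int)) := by
  have hkeys0 : (items.foldl (fun d x => d.insert x 0)
      (PySem.Dict.empty : PySem.Dict String Int)).keys = PySem.Set.ofList items := by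
    have h := PySem.Dict.keys_foldl_insert items
      (fun (_ : PySem.Dict String Int) (_ : String) => (0 : Int)) PySem.Dict.empty
    have he : (PySem.Dict.empty : PySem.Dict String Int).keys = ([] : List String) := rfl
    rw [he] at h
    rw [h, PySem.Set.update_nil_left]
  have hkeys : (items.foldl (fun d x => d.modify x 0 (· + 1))
      (items.foldl (fun d x => d.insert x 0) (PySem.Dict.empty : PySem.Dict String Int))).keys
      = PySem.Set.ofList items := by
    have h := PySem.Dict.keys_foldl_modify items (0 : Int)
      (fun (_ : PySem.Dict String Int) (_ : String) (v : Int) => v + 1)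
      (items.foldl (fun d x => d.insert x 0) (PySem.Dict.empty : PySem.Dict String Int))
    rw [hkeys0] at h
    rw [h, update_ofList_self]
  have hnd : (items.foldl (fun d x => d.modify x 0 (· + 1))
      (items.foldl (fun d x => d.insert x 0) (PySem.Dict.empty : PySem.Dict String Int))).keys.Nodup := by
    rw [hkeys]; exact PySem.Set.nodup_ofList items
  rw [PySem.Dict.values_eq_map_keys _ hnd 0, hkeys]
  refine List.map_congr_left (fun k _ => ?_)
  have h1 := PySem.Dict.getD_foldl_modify_add_one items
    (items.foldl (fun d x => d.insert x 0) (PySem.Dict.empty : PySem.Dict String Int)) k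
  have h0 : (items.foldl (fun d x => d.insert x 0)
      (PySem.Dict.empty : PySem.Dict String Int)).getD k 0 = 0 :=
    insert0_getD items PySem.Dict.empty (fun _ => rfl) k
  rw [h1, h0, zero_add]

lemma ite_max : (fun (acc c : Int) => if c > acc then c else acc) = max := by
  funext a c
  rcases lt_or_ge a c with h | h
  · rw [if_pos h, max_eq_right h.le]
  · rw [if_neg (not_lt.mpr h), max_eq_left h]

-- ===== VERDICT (by name: the statement is the Claim_ definition above) =====
theorem BestInvitation_spec : Claim_equal_BestInvitation := by
  intro first second _ hpre
  obtain ⟨hne, hlen⟩ := hpre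
  unfold Spec_BestInvitation BestInvitation BestInvitation_alt
  simp only [foldA1 first second hlen, foldA2 first second hlen, foldB first second hlen]
  rw [values_A, altLoop_eq (pvItems first second).length (pvItems first second) le_rfl 0, ite_max]
  obtain ⟨a, ft, rfl⟩ : ∃ a ft, first = a :: ft := by
    cases first with
    | nil => exact absurd rfl hne
    | cons a ft => exact ⟨a, ft, rfl⟩
  obtain ⟨b, st, rfl⟩ : ∃ b st, second = b :: st := by
    cases second with
    | nil => simp at hlen
    | cons b st => exact ⟨b, st, rfl⟩
  have hitems : pvItems (a :: ft) (b :: st) = a :: b :: (ft.zip st).flatMap (fun p => [p.1, p.2]) := by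
    simp [pvItems]
  rw [hitems, PySem.Set.ofList_cons, List.map_cons, List.foldl_cons]
  rw [PySem.List.max?_id_cons, Option.getD_some]
  have hmem : a ∈ a :: b :: (ft.zip st).flatMap (fun p => [p.1, p.2]) := List.mem_cons_self
  have hpos : (0 : Int) < (List.count a (a :: b :: (ft.zip st).flatMap (fun p => [p.1, p.2])) : Int) := by
    exact_mod_cast List.count_pos_iff.mpr hmem
  rw [max_eq_right hpos.le]

@[simp] theorem BestInvitation_raises : Claim_raises_BestInvitation := by
  unfold Claim_raises_BestInvitation
  constructor
  · intro first _second _ hr hpre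
    exact hpre.1 hr
  · refine ⟨by decide, by decide, ?_⟩
    show BestInvitation_alt [] [] = 0
    unfold BestInvitation_alt
    rw [show (PySem.List.pyRange 0 (PySem.List.len ([] : List String))).foldl
        (fun acc i => (acc ++ [PySem.List.pyGetD ([] : List String) i ""]) ++ [PySem.List.pyGetD ([] : List String) i ""]) [] = ([] : List String) from rfl]
    rw [altLoop]
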